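-- pv_equiv track=rewrite | github.com/kotama7/AI-Scientist-v2-HPC | ai_scientist/treesearch/utils/tree_export.py | _get_phases_for_branch
-- ===== SOURCE A (Python) =====
-- def _get_phases_for_branch(branch_id: str, events: dict, archival: dict) -> list[str]:
--     """Get all phases associated with a branch."""
--     phases = set()
--
--     for event in events.get(branch_id, []):
--         if event.get("phase"):
--             phases.add(event["phase"])
--
--     for record in archival.get(branch_id, []):
--         if record.get("phase"):
--             phases.add(record["phase"])
--
--     if events.get(branch_id) or archival.get(branch_id):
--         phases.add("summary")
--
--     phase_order = ["phase0", "phase1", "phase2", "phase3", "phase4", "summary"]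
--     sorted_phases = []
--     for p in phase_order:
--         if p in phases:
--             sorted_phases.append(p)
--     for p in sorted(phases):
--         if p not in sorted_phases:
--             sorted_phases.append(p)
--
--     return sorted_phases
-- ===== SOURCE B (Python) =====
-- def _get_phases_for_branch(branch_id: str, events: dict, archival: dict) -> list[str]:
--     """Get all phases associated with a branch."""
--     phases = set()
--
--     for event in events.get(branch_id, []):
--         if event.get("phase"):
--             phases.add(event["phase"])
--
--     for record in archival.get(branch_id, []):
--         if record.get("phase"):
--             phases.add(record["phase"])
--
--     if events.get(branch_id) or archival.get(branch_id):
--         phases.add("summary")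
--
--     phase_order = ["phase0", "phase1", "phase2", "phase3", "phase4", "summary"]
--     pos = {name: i for i, name in enumerate(phase_order)}
--     return sorted(phases, key=lambda p: (pos.get(p, len(phase_order)), p))
-- ===== Notes on version B (the rewrite author's own statement) =====
-- stated objective: simpler
-- what changed: The two-pass ordering (a loop over phase_order appending known phases, then a second loop over sorted(phases) with a membership test against the growing output list) is replaced by one sorted() call whose key is (position-in-phase_order, else len(phase_order); phase), with the positions precomputed in a dict; the set aggregation is unchanged.
import Mathlib
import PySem

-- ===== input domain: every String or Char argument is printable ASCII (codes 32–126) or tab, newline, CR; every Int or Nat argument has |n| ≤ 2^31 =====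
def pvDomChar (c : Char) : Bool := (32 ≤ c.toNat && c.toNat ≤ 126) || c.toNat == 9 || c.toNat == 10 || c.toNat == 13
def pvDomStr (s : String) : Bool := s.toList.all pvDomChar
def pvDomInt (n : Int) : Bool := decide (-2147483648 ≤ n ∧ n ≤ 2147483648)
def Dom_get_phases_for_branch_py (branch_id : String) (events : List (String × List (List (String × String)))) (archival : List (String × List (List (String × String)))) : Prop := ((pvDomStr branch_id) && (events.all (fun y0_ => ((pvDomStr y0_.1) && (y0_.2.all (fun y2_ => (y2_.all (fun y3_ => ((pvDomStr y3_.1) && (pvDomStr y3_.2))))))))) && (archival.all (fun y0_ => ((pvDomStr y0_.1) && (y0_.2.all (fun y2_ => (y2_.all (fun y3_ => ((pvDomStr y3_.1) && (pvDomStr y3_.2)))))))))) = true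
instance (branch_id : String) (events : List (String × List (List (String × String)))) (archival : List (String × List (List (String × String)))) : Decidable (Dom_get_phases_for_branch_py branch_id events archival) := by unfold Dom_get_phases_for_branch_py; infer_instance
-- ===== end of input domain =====

-- B (simpler): the phase-set aggregation is unchanged; the two-pass ordering (loop over
-- phase_order, then a second loop over sorted(phases) with a membership check) is replaced
-- by ONE sorted() call with the key (position-in-phase_order or len(phase_order), phase).

-- ===== PORT A =====
def pvPhaseOrder : List String := ["phase0", "phase1", "phase2", "phase3", "phase4", "summary"]

-- shared aggregation (identical loops in both Pythons): the set `phases`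
def pvCollectPhases (branch_id : String) (events : List (String × List (List (String × String)))) (archival : List (String × List (List (String × String)))) : PySem.Set String :=
  let evs := (PySem.Dict.mk events).getD branch_id []
  let ars := (PySem.Dict.mk archival).getD branch_id []
  let s1 := evs.foldl (fun s event =>
      let v := (PySem.Dict.mk event).getD "phase" ""   -- event.get("phase") truthy ↔ present and ≠ ""
      if v ≠ "" then PySem.Set.add s v else s) PySem.Set.empty
  let s2 := ars.foldl (fun s record =>
      let v := (PySem.Dict.mk record).getD "phase" ""
      if v ≠ "" then PySem.Set.add s v else s) s1
  if !evs.isEmpty || !ars.isEmpty then PySem.Set.add s2 "summary" else s2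

def get_phases_for_branch_py (branch_id : String) (events : List (String × List (List (String × String)))) (archival : List (String × List (List (String × String)))) : List String :=
  let phases := pvCollectPhases branch_id events archival
  let sorted_phases := pvPhaseOrder.foldl
      (fun acc p => if PySem.Set.contains phases p then acc ++ [p] else acc) []
  (PySem.List.sorted phases (fun p => p) false).foldl
      (fun acc p => if acc.contains p then acc else acc ++ [p]) sorted_phases

-- ===== PORT B =====
def get_phases_for_branch_py_alt (branch_id : String) (events : List (String × List (List (String × String)))) (archival : List (String × List (List (String × String)))) : List String :=
  let phases := pvCollectPhases branch_id events archival
  let pos : PySem.Dict String Int :=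
    (PySem.List.enumerate pvPhaseOrder 0).foldl (fun d iname => d.insert iname.2 iname.1) PySem.Dict.empty
  PySem.List.sorted2 phases (fun p => pos.getD p (pvPhaseOrder.length : Int)) (fun p => p) false

-- ===== PRECONDITION & SPEC =====
def Spec_get_phases_for_branch_py (branch_id : String) (events : List (String × List (List (String × String)))) (archival : List (String × List (List (String × String)))) (out : List String) : Prop := out = get_phases_for_branch_py_alt branch_id events archival
instance (branch_id : String) (events : List (String × List (List (String × String)))) (archival : List (String × List (List (String × String)))) (out : List String) : Decidable (Spec_get_phases_for_branch_py branch_id events archival out) := by unfold Spec_get_phases_for_branch_py; infer_instance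

-- ===== CLAIM (what is proved, stated in full; the proofs are below) =====
def Claim_equal_get_phases_for_branch_py : Prop := ∀ (branch_id : String) (events : List (String × List (List (String × String)))) (archival : List (String × List (List (String × String)))), Dom_get_phases_for_branch_py branch_id events archival → Spec_get_phases_for_branch_py branch_id events archival (get_phases_for_branch_py branch_id events archival)

-- ===== LEMMAS AND PROOFS =====

-- the position function of B's key, outside the let for the proofs
def pvK1 (p : String) : Int :=
  ((PySem.List.enumerate pvPhaseOrder 0).foldl (fun d iname => d.insert iname.2 iname.1) PySem.Dict.empty).getD p (pvPhaseOrder.length : Int)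

-- the common ordering both programs produce on a duplicate-free phase list S
def pvTarget (S : List String) : List String :=
  pvPhaseOrder.filter (fun p => decide (p ∈ S)) ++
    (PySem.List.sorted S (fun p => p) false).filter (fun p => !decide (p ∈ pvPhaseOrder))

theorem pvK1_lt_of_mem {p : String} (h : p ∈ pvPhaseOrder) : pvK1 p < 6 := by
  fin_cases h <;> decide

theorem pvK1_eq_of_not_mem {p : String} (h : p ∉ pvPhaseOrder) : pvK1 p = 6 := by
  simp [pvPhaseOrder, List.mem_cons] at h
  obtain ⟨h0, h1, h2, h3, h4, h5⟩ := h
  simp [pvK1, pvPhaseOrder, PySem.List.enumerate, PySem.Dict.getD, PySem.Dict.get?,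
    PySem.Dict.insert, PySem.Dict.empty, Ne.symm h0, Ne.symm h1, Ne.symm h2, Ne.symm h3,
    Ne.symm h4, Ne.symm h5]

theorem pv_nodup_collect (branch_id : String) (events archival : List (String × List (List (String × String)))) :
    (pvCollectPhases branch_id events archival).Nodup := by
  have step : ∀ (xs : List (List (String × String))) (s : PySem.Set String), s.Nodup →
      (xs.foldl (fun s event =>
        let v := (PySem.Dict.mk event).getD "phase" ""
        if v ≠ "" then PySem.Set.add s v else s) s).Nodup := by
    intro xs
    induction xs with
    | nil => intro s hs; exact hs
    | cons x xs ih =>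
        intro s hs
        simp only [List.foldl_cons]
        apply ih
        split
        · exact PySem.Set.nodup_add _ _ hs
        · exact hs
  have h2 := step ((PySem.Dict.mk archival).getD branch_id [])
    _ (step ((PySem.Dict.mk events).getD branch_id []) PySem.Set.empty List.nodup_nil)
  unfold pvCollectPhases
  dsimp only
  split
  · exact PySem.Set.nodup_add _ _ h2
  · exact h2

-- Python's order-preserving dedup-append loop, characterised
theorem pv_dedup_foldl (xs : List String) (h : xs.Nodup) : ∀ (init : List String),
    xs.foldl (fun acc p => if acc.contains p then acc else acc ++ [p]) init
      = init ++ xs.filter (fun p => !init.contains p) := by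
  induction xs with
  | nil => intro init; simp
  | cons x xs ih =>
      intro init
      have hx : x ∉ xs := (List.nodup_cons.mp h).1
      have hxs : xs.Nodup := (List.nodup_cons.mp h).2
      by_cases hc : x ∈ init
      · simp only [List.foldl_cons, List.filter_cons]
        rw [if_pos (by simpa using hc), ih hxs init]
        simp [hc]
      · simp only [List.foldl_cons, List.filter_cons]
        rw [if_neg (by simpa using hc), ih hxs (init ++ [x])]
        have : xs.filter (fun p => !(init ++ [x]).contains p) = xs.filter (fun p => !init.contains p) := by
          apply List.filter_congr
          intro p hp
          have : p ≠ x := fun e => hx (e ▸ hp)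
          simp [this]
        rw [this]
        simp [hc]

theorem pvA_eq_target (S : List String) (hS : S.Nodup) :
    (PySem.List.sorted S (fun p => p) false).foldl
        (fun acc p => if acc.contains p then acc else acc ++ [p])
        (pvPhaseOrder.foldl (fun acc p => if PySem.Set.contains S p then acc ++ [p] else acc) []) = pvTarget S := by
  have h1 : pvPhaseOrder.foldl (fun acc p => if PySem.Set.contains S p then acc ++ [p] else acc) []
      = pvPhaseOrder.filter (fun p => decide (p ∈ S)) := by
    rw [PySem.List.foldl_append_if]
    simp only [List.nil_append, List.map_id']
    apply List.filter_congr
    intro p _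
    simp [PySem.Set.contains]
  have hnod : (PySem.List.sorted S (fun p => p) false).Nodup :=
    ((PySem.List.sorted_perm S (fun p => p) false).symm.nodup hS)
  rw [h1, pv_dedup_foldl _ hnod]
  unfold pvTarget
  congr 1
  apply List.filter_congr
  intro p hp
  have hpS : p ∈ S := (PySem.List.sorted_perm S (fun p => p) false).mem_iff.mp hp
  congr 1
  simp only [List.contains_eq_mem, List.mem_filter]
  simp [hpS]

-- sorted with a two-component key is sorted with the lexicographic key
theorem pv_sorted2_eq_sorted_lex {α : Type} (xs : List α) (k1 : α → Int) (k2 : α → String) :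
    PySem.List.sorted2 xs k1 k2 false = PySem.List.sorted xs (fun x => toLex (k1 x, k2 x)) false := by
  unfold PySem.List.sorted2 PySem.List.sorted
  simp only [if_neg (by decide : ¬ (false = true))]
  congr 1
  funext acc x
  congr 1
  funext a b
  rw [show (decide (toLex (k1 a, k2 a) < toLex (k1 b, k2 b))
        = decide (k1 a < k1 b ∨ k1 a = k1 b ∧ k2 a < k2 b)) from
    decide_eq_decide.mpr (Prod.Lex.toLex_lt_toLex)]
  rcases lt_trichotomy (k1 a) (k1 b) with h | h | h
  · simp [h]
  · simp [h]
  · have h1 : ¬ k1 a < k1 b := asymm h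
    simp [h, h1, h.ne']

theorem pvB_eq_target (S : List String) (hS : S.Nodup) :
    PySem.List.sorted2 S pvK1 (fun p => p) false = pvTarget S := by
  rw [pv_sorted2_eq_sorted_lex]
  apply PySem.List.sorted_eq_of_perm_of_pairwise_lt
  · -- pvTarget S is a permutation of S
    have hfilter : List.Perm (pvPhaseOrder.filter (fun p => decide (p ∈ S)))
        (S.filter (fun p => decide (p ∈ pvPhaseOrder))) := by
      rw [List.perm_ext_iff_of_nodup ((by decide : pvPhaseOrder.Nodup).filter _) (hS.filter _)]
      intro a
      simp only [List.mem_filter, decide_eq_true_eq]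
      tauto
    have hsorted : List.Perm ((PySem.List.sorted S (fun p => p) false).filter (fun p => !decide (p ∈ pvPhaseOrder)))
        (S.filter (fun p => !decide (p ∈ pvPhaseOrder))) :=
      (PySem.List.sorted_perm S (fun p => p) false).filter _
    exact (hfilter.append hsorted).trans (List.filter_append_perm _ S)
  · -- strictly increasing lexicographic keys along pvTarget S
    unfold pvTarget
    rw [List.pairwise_append]
    refine ⟨?_, ?_, ?_⟩
    · exact ((by decide :
        pvPhaseOrder.Pairwise (fun a b => pvK1 a < pvK1 b ∨ pvK1 a = pvK1 b ∧ a < b)).sublist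
        List.filter_sublist).imp (fun h => Prod.Lex.toLex_lt_toLex.mpr h)
    · have hle : (PySem.List.sorted S (fun p => p) false).Pairwise (fun a b => a ≤ b) :=
        PySem.List.sorted_pairwise S (fun p => p)
      have hne : (PySem.List.sorted S (fun p => p) false).Pairwise (fun a b => a ≠ b) :=
        (PySem.List.sorted_perm S (fun p => p) false).symm.nodup hS
      have hlt : (PySem.List.sorted S (fun p => p) false).Pairwise (fun a b => a < b) :=
        (hle.and hne).imp (fun h => lt_of_le_of_ne h.1 h.2)
      have hflt : ((PySem.List.sorted S (fun p => p) false).filter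
          (fun p => !decide (p ∈ pvPhaseOrder))).Pairwise (fun a b => a < b) :=
        hlt.sublist List.filter_sublist
      refine List.Pairwise.imp_of_mem ?_ hflt
      intro a b ha hb hab
      have ha6 : pvK1 a = 6 := pvK1_eq_of_not_mem (by
        have := (List.mem_filter.mp ha).2; simpa using this)
      have hb6 : pvK1 b = 6 := pvK1_eq_of_not_mem (by
        have := (List.mem_filter.mp hb).2; simpa using this)
      exact Prod.Lex.toLex_lt_toLex.mpr (Or.inr ⟨ha6.trans hb6.symm, hab⟩)
    · intro a ha b hb
      have haM : a ∈ pvPhaseOrder := (List.mem_filter.mp ha).1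
      have hb6 : pvK1 b = 6 := pvK1_eq_of_not_mem (by
        have := (List.mem_filter.mp hb).2; simpa using this)
      exact Prod.Lex.toLex_lt_toLex.mpr (Or.inl (by rw [hb6]; exact pvK1_lt_of_mem haM))

-- ===== VERDICT (by name: the statement is the Claim_ definition above) =====
theorem get_phases_for_branch_py_spec : Claim_equal_get_phases_for_branch_py := by
  intro branch_id events archival _
  unfold Spec_get_phases_for_branch_py get_phases_for_branch_py get_phases_for_branch_py_alt
  have hS := pv_nodup_collect branch_id events archival
  rw [pvA_eq_target _ hS]
  exact (pvB_eq_target _ hS).symm
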